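-- pv_equiv track=rewrite | github.com/forgiri-dev/FinSamaritan | backend/stock_data_generator.py | get_sector_from_symbol
-- ===== SOURCE A (Python) =====
-- def get_sector_from_symbol(symbol):
--     """Map stock symbol to sector based on common patterns"""
--     symbol_upper = symbol.upper()
--
--     if any(x in symbol_upper for x in ['BANK', 'FIN', 'LIFE', 'AMC']):
--         return 'Banking'
--     elif any(x in symbol_upper for x in ['TECH', 'SOFT', 'INFO', 'ZOMATO', 'NAZARA']):
--         return 'IT'
--     elif any(x in symbol_upper for x in ['PHARMA', 'DR', 'CIPLA', 'SUN', 'LUPIN', 'DIVIS', 'BIOCON']):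
--         return 'Pharma'
--     elif any(x in symbol_upper for x in ['MOTOR', 'AUTO', 'HERO', 'BAJAJ-AUTO', 'EICHER', 'ASHOK', 'TVS']):
--         return 'Auto'
--     elif any(x in symbol_upper for x in ['POWER', 'ENERGY', 'NTPC', 'ADANIPOWER', 'TORNTPOWER']):
--         return 'Energy'
--     elif any(x in symbol_upper for x in ['CEM', 'ULTRACEM', 'SHREECEM', 'ACC', 'AMBUJA']):
--         return 'Manufacturing'
--     elif any(x in symbol_upper for x in ['PAINT', 'ASIAN', 'BERGE', 'KANSAI']):
--         return 'Manufacturing'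
--     elif any(x in symbol_upper for x in ['STEEL', 'TATASTEEL', 'JSWSTEEL', 'SAIL']):
--         return 'Manufacturing'
--     elif any(x in symbol_upper for x in ['RELIANCE', 'ONGC', 'IOC', 'BPCL', 'HPCL', 'GAIL']):
--         return 'Energy'
--     elif any(x in symbol_upper for x in ['FMCG', 'HUL', 'ITC', 'NESTLE', 'BRITANNIA', 'DABUR', 'MARICO']):
--         return 'FMCG'
--     elif any(x in symbol_upper for x in ['TELECOM', 'BHARTI', 'IDEA', 'RCOM']):
--         return 'Telecom'
--     elif any(x in symbol_upper for x in ['DLF', 'GODREJPROP', 'PRESTIGE', 'SOBHA', 'BRIGADE']):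
--         return 'Real Estate'
--     else:
--         return 'Others'
-- ===== SOURCE B (Python) =====
-- _SECTORS = ['Banking', 'IT', 'Pharma', 'Auto', 'Energy', 'Manufacturing',
--             'Manufacturing', 'Manufacturing', 'Energy', 'FMCG', 'Telecom', 'Real Estate']
--
-- # hash index: pattern -> priority (index of its branch in the sector order above)
-- _RANK = {}
-- for _i, _ps in enumerate([
--     ['BANK', 'FIN', 'LIFE', 'AMC'],
--     ['TECH', 'SOFT', 'INFO', 'ZOMATO', 'NAZARA'],
--     ['PHARMA', 'DR', 'CIPLA', 'SUN', 'LUPIN', 'DIVIS', 'BIOCON'],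
--     ['MOTOR', 'AUTO', 'HERO', 'BAJAJ-AUTO', 'EICHER', 'ASHOK', 'TVS'],
--     ['POWER', 'ENERGY', 'NTPC', 'ADANIPOWER', 'TORNTPOWER'],
--     ['CEM', 'ULTRACEM', 'SHREECEM', 'ACC', 'AMBUJA'],
--     ['PAINT', 'ASIAN', 'BERGE', 'KANSAI'],
--     ['STEEL', 'TATASTEEL', 'JSWSTEEL', 'SAIL'],
--     ['RELIANCE', 'ONGC', 'IOC', 'BPCL', 'HPCL', 'GAIL'],
--     ['FMCG', 'HUL', 'ITC', 'NESTLE', 'BRITANNIA', 'DABUR', 'MARICO'],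
--     ['TELECOM', 'BHARTI', 'IDEA', 'RCOM'],
--     ['DLF', 'GODREJPROP', 'PRESTIGE', 'SOBHA', 'BRIGADE']]):
--     for _p in _ps:
--         _RANK[_p] = _i
--
-- _MAXLEN = 10  # longest pattern
--
-- def get_sector_from_symbol(symbol):
--     """Map stock symbol to sector: scan the symbol's substrings against a
--     pattern->priority hash index and return the best-priority sector found."""
--     u = symbol.upper()
--     best = len(_SECTORS)  # 12 = nothing matched
--     for i in range(len(u)):
--         for L in range(1, _MAXLEN + 1):
--             r = _RANK.get(u[i:i + L], 12)
--             if r < best: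
--                 best = r
--     return _SECTORS[best] if best < len(_SECTORS) else 'Others'
-- ===== Notes on version B (the rewrite author's own statement) =====
-- stated objective: alternative
-- what changed: Inverts the search: instead of testing each of 63 patterns for containment in the symbol, B enumerates the symbol's substrings of length 1..10 and looks each up in a pattern->priority hash index, returning the sector of the minimum priority found.
import Mathlib
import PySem

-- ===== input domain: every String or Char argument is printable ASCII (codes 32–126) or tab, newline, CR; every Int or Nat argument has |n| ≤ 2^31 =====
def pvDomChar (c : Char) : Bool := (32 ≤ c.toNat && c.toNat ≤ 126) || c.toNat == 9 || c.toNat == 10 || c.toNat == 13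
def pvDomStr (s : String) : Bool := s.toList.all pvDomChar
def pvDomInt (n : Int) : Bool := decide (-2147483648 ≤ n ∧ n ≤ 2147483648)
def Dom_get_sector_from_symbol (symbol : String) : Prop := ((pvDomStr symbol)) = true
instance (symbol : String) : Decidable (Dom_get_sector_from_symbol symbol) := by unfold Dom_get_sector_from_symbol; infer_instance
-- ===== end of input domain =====

-- B inverts the search: it enumerates the symbol's substrings (length 1..10) and looks each up
-- in a pattern->priority hash index, returning the sector of the minimum priority found; objective: alternative.


-- ===== PORT A =====
def get_sector_from_symbol (symbol : String) : String :=
  let symbol_upper := PySem.Str.upper symbol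
  if ["BANK", "FIN", "LIFE", "AMC"].any (fun x => PySem.Str.isIn x symbol_upper) then "Banking"
    else if ["TECH", "SOFT", "INFO", "ZOMATO", "NAZARA"].any (fun x => PySem.Str.isIn x symbol_upper) then "IT"
    else if ["PHARMA", "DR", "CIPLA", "SUN", "LUPIN", "DIVIS", "BIOCON"].any (fun x => PySem.Str.isIn x symbol_upper) then "Pharma"
    else if ["MOTOR", "AUTO", "HERO", "BAJAJ-AUTO", "EICHER", "ASHOK", "TVS"].any (fun x => PySem.Str.isIn x symbol_upper) then "Auto"
    else if ["POWER", "ENERGY", "NTPC", "ADANIPOWER", "TORNTPOWER"].any (fun x => PySem.Str.isIn x symbol_upper) then "Energy"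
    else if ["CEM", "ULTRACEM", "SHREECEM", "ACC", "AMBUJA"].any (fun x => PySem.Str.isIn x symbol_upper) then "Manufacturing"
    else if ["PAINT", "ASIAN", "BERGE", "KANSAI"].any (fun x => PySem.Str.isIn x symbol_upper) then "Manufacturing"
    else if ["STEEL", "TATASTEEL", "JSWSTEEL", "SAIL"].any (fun x => PySem.Str.isIn x symbol_upper) then "Manufacturing"
    else if ["RELIANCE", "ONGC", "IOC", "BPCL", "HPCL", "GAIL"].any (fun x => PySem.Str.isIn x symbol_upper) then "Energy"
    else if ["FMCG", "HUL", "ITC", "NESTLE", "BRITANNIA", "DABUR", "MARICO"].any (fun x => PySem.Str.isIn x symbol_upper) then "FMCG"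
    else if ["TELECOM", "BHARTI", "IDEA", "RCOM"].any (fun x => PySem.Str.isIn x symbol_upper) then "Telecom"
    else if ["DLF", "GODREJPROP", "PRESTIGE", "SOBHA", "BRIGADE"].any (fun x => PySem.Str.isIn x symbol_upper) then "Real Estate"
  else "Others"

-- ===== PORT B =====
-- module-level _SECTORS
def sectorsB : List String := ["Banking", "IT", "Pharma", "Auto", "Energy", "Manufacturing", "Manufacturing", "Manufacturing", "Energy", "FMCG", "Telecom", "Real Estate"]

-- module-level _RANK : pattern -> priority (built by Source B's enumerate loop; 63 distinct keys)
def rankDict : PySem.Dict String Int := PySem.Dict.ofList [("BANK", 0), ("FIN", 0), ("LIFE", 0), ("AMC", 0), ("TECH", 1), ("SOFT", 1), ("INFO", 1), ("ZOMATO", 1), ("NAZARA", 1), ("PHARMA", 2), ("DR", 2), ("CIPLA", 2), ("SUN", 2), ("LUPIN", 2), ("DIVIS", 2), ("BIOCON", 2), ("MOTOR", 3), ("AUTO", 3), ("HERO", 3), ("BAJAJ-AUTO", 3), ("EICHER", 3), ("ASHOK", 3), ("TVS", 3), ("POWER", 4), ("ENERGY", 4), ("NTPC", 4), ("ADANIPOWER",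 4), ("TORNTPOWER", 4), ("CEM", 5), ("ULTRACEM", 5), ("SHREECEM", 5), ("ACC", 5), ("AMBUJA", 5), ("PAINT", 6), ("ASIAN", 6), ("BERGE", 6), ("KANSAI", 6), ("STEEL", 7), ("TATASTEEL", 7), ("JSWSTEEL", 7), ("SAIL", 7), ("RELIANCE", 8), ("ONGC", 8), ("IOC", 8), ("BPCL", 8), ("HPCL", 8), ("GAIL", 8), ("FMCG", 9), ("HUL", 9), ("ITC", 9), ("NESTLE", 9), ("BRITANNIA", 9), ("DABUR", 9), ("MARICO", 9), ("TELECOM", 10), ("BHARTI", 10), ("IDEA", 10), ("RCOM", 10), ("DLF", 11), ("GODREJPROP", 11), ("PRESTIGE", 11), ("SOBHA", 11), ("BRIGADE", 11)]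

def get_sector_from_symbol_alt (symbol : String) : String :=
  let u := PySem.Str.upper symbol
  let best : Int :=
    (PySem.List.pyRange 0 (PySem.Str.len u) 1).foldl (fun best i =>
      (PySem.List.pyRange 1 11 1).foldl (fun best L =>
        let r := rankDict.getD (PySem.Str.slice u (some i) (some (i + L))) 12
        if r < best then r else best) best) 12
  if best < 12 then
    -- _SECTORS[best]: best is then a valid index, so pyGet? is some; the none arm is unreachable
    match PySem.List.pyGet? sectorsB best with
    | some s => s
    | none => "Others"
  else "Others"

-- ===== PRECONDITION & SPEC =====
def Spec_get_sector_from_symbol (symbol : String) (out : String) : Prop := out = get_sector_from_symbol_alt symbol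
instance (symbol : String) (out : String) : Decidable (Spec_get_sector_from_symbol symbol out) := by unfold Spec_get_sector_from_symbol; infer_instance

-- ===== CLAIM (what is proved, stated in full; the proofs are below) =====
def Claim_equal_get_sector_from_symbol : Prop := ∀ (symbol : String), Dom_get_sector_from_symbol symbol → Spec_get_sector_from_symbol symbol (get_sector_from_symbol symbol)

-- ===== LEMMAS AND PROOFS =====

-- A's twelve pattern groups, in branch order (proof-side view of A's literals)
def groupsA : List (List String) :=
  [["BANK", "FIN", "LIFE", "AMC"],
    ["TECH", "SOFT", "INFO", "ZOMATO", "NAZARA"],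
    ["PHARMA", "DR", "CIPLA", "SUN", "LUPIN", "DIVIS", "BIOCON"],
    ["MOTOR", "AUTO", "HERO", "BAJAJ-AUTO", "EICHER", "ASHOK", "TVS"],
    ["POWER", "ENERGY", "NTPC", "ADANIPOWER", "TORNTPOWER"],
    ["CEM", "ULTRACEM", "SHREECEM", "ACC", "AMBUJA"],
    ["PAINT", "ASIAN", "BERGE", "KANSAI"],
    ["STEEL", "TATASTEEL", "JSWSTEEL", "SAIL"],
    ["RELIANCE", "ONGC", "IOC", "BPCL", "HPCL", "GAIL"],
    ["FMCG", "HUL", "ITC", "NESTLE", "BRITANNIA", "DABUR", "MARICO"],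
    ["TELECOM", "BHARTI", "IDEA", "RCOM"],
    ["DLF", "GODREJPROP", "PRESTIGE", "SOBHA", "BRIGADE"]]

-- the list of priorities B's nested loops range over
def allRanks (u : String) : List Int :=
  (PySem.List.pyRange 0 (PySem.Str.len u) 1).flatMap (fun i =>
    (PySem.List.pyRange 1 11 1).map (fun L =>
      rankDict.getD (PySem.Str.slice u (some i) (some (i + L))) 12))

-- A's k-th branch condition
def matchA (k : Nat) (u : String) : Bool := (groupsA[k]!).any (fun p => PySem.Str.isIn p u)

lemma foldl_min_le_init (l : List Int) (b : Int) : l.foldl min b ≤ b := by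
  induction l generalizing b with
  | nil => simp
  | cons x xs ih => exact le_trans (ih (min b x)) (min_le_left _ _)

lemma foldl_min_le_mem (l : List Int) (b x : Int) (hx : x ∈ l) : l.foldl min b ≤ x := by
  induction l generalizing b with
  | nil => simp at hx
  | cons y ys ih =>
      rcases List.mem_cons.mp hx with rfl | hx'
      · exact le_trans (foldl_min_le_init ys (min b x)) (min_le_right _ _)
      · exact ih (min b y) hx'

lemma foldl_min_cases (l : List Int) (b : Int) : l.foldl min b = b ∨ l.foldl min b ∈ l := by
  induction l generalizing b with
  | nil => exact Or.inl rfl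
  | cons x xs ih =>
      rcases ih (min b x) with h | h
      · rcases min_choice b x with hm | hm
        · left; rw [List.foldl_cons, h, hm]
        · right; rw [List.foldl_cons, h, hm]; exact List.mem_cons_self
      · right; rw [List.foldl_cons]; exact List.mem_cons_of_mem _ h

lemma foldl_flatMap_min {α : Type} (l : List α) (f : α → List Int) (b : Int) :
    (l.flatMap f).foldl min b = l.foldl (fun b a => (f a).foldl min b) b := by
  induction l generalizing b with
  | nil => rfl
  | cons x xs ih => simp [List.foldl_append, ih]

lemma foldl_if_min {α : Type} (l : List α) (h : α → Int) (b : Int) :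
    l.foldl (fun b x => if h x < b then h x else b) b = (l.map h).foldl min b := by
  induction l generalizing b with
  | nil => rfl
  | cons x xs ih =>
      simp only [List.foldl_cons, List.map_cons, ih]
      congr 1
      omega

-- B's nested if-fold is the min-fold over allRanks
lemma best_eq (u : String) :
    ((PySem.List.pyRange 0 (PySem.Str.len u) 1).foldl (fun best i =>
      (PySem.List.pyRange 1 11 1).foldl (fun best L =>
        let r := rankDict.getD (PySem.Str.slice u (some i) (some (i + L))) 12
        if r < best then r else best) best) 12) = (allRanks u).foldl min 12 := by
  unfold allRanks
  rw [foldl_flatMap_min]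
  have hf : (fun (b i : Int) =>
      (PySem.List.pyRange 1 11 1).foldl (fun best L =>
        let r := rankDict.getD (PySem.Str.slice u (some i) (some (i + L))) 12
        if r < best then r else best) b)
      = fun (b i : Int) => ((PySem.List.pyRange 1 11 1).map (fun L =>
          rankDict.getD (PySem.Str.slice u (some i) (some (i + L))) 12)).foldl min b := by
    funext b i
    exact foldl_if_min _ _ b
  rw [hf]

-- every scanned substring is an infix of u
lemma mem_allRanks_infix (u : String) (r : Int) (hr : r ∈ allRanks u) :
    ∃ s : String, s.toList <:+: u.toList ∧ rankDict.getD s 12 = r := by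
  unfold allRanks at hr
  obtain ⟨i, hi, hr⟩ := List.mem_flatMap.mp hr
  obtain ⟨L, hL, hr⟩ := List.mem_map.mp hr
  obtain ⟨hi0, hin⟩ := PySem.List.mem_pyRange_one.mp hi
  obtain ⟨hL1, hL11⟩ := PySem.List.mem_pyRange_one.mp hL
  refine ⟨PySem.Str.slice u (some i) (some (i + L)), ?_, hr⟩
  have ht : (PySem.Str.slice u (some i) (some (i + L))).toList
      = (u.toList.drop i.toNat).take ((i + L).toNat - i.toNat) := by
    rw [PySem.Str.toList_slice]
    exact PySem.List.slice_toNat _ hi0 (by omega)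
  rw [ht]
  exact ((u.toList.drop i.toNat).take_prefix _).isInfix.trans
    (u.toList.drop_suffix i.toNat).isInfix

-- every pattern of group k is a dict key with priority k and has length 1..10 (literal check)
lemma rank_complete : ∀ k : Nat, k < 12 → ∀ p ∈ groupsA[k]!,
    rankDict.getD p 12 = (k : Int) ∧ 1 ≤ p.toList.length ∧ p.toList.length ≤ 10 := by
  set_option maxRecDepth 10000 in decide

-- a pattern contained in u contributes its priority to allRanks
lemma mem_allRanks_of_infix (u p : String) (hp : p.toList <:+: u.toList)
    (h1 : 1 ≤ p.toList.length) (h10 : p.toList.length ≤ 10) :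
    rankDict.getD p 12 ∈ allRanks u := by
  obtain ⟨pre, suf, heq⟩ := hp
  have hdrop : u.toList.drop pre.length = p.toList ++ suf := by
    rw [← heq]; simp
  have hjlt : pre.length < u.toList.length := by
    have := congrArg List.length heq
    simp at this ⊢
    have h1' : 1 ≤ p.length := by simpa using h1
    omega
  have hslice : PySem.Str.slice u (some (pre.length : Int))
      (some ((pre.length : Int) + (p.toList.length : Int))) = p := by
    apply String.toList_inj.mp
    rw [PySem.Str.toList_slice, PySem.Chars.slice_eq_listSlice, PySem.List.slice_natCast_add, hdrop]
    simp
  unfold allRanks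
  refine List.mem_flatMap.mpr ⟨(pre.length : Int),
    PySem.List.mem_pyRange_one.mpr ⟨by positivity, by simp; exact_mod_cast hjlt⟩, ?_⟩
  refine List.mem_map.mpr ⟨(p.toList.length : Int),
    PySem.List.mem_pyRange_one.mpr ⟨by exact_mod_cast h1, by exact_mod_cast (by omega : p.toList.length < 11)⟩, ?_⟩
  rw [hslice]

def rankPairs : List (String × Int) := [("BANK", 0), ("FIN", 0), ("LIFE", 0), ("AMC", 0), ("TECH", 1), ("SOFT", 1), ("INFO", 1), ("ZOMATO", 1), ("NAZARA", 1), ("PHARMA", 2), ("DR", 2), ("CIPLA", 2), ("SUN", 2), ("LUPIN", 2), ("DIVIS", 2), ("BIOCON", 2), ("MOTOR", 3), ("AUTO", 3), ("HERO", 3), ("BAJAJ-AUTO", 3), ("EICHER", 3), ("ASHOK", 3), ("TVS", 3), ("POWER", 4), ("ENERGY", 4), ("NTPC", 4), ("ADANIPOWER", 4), ("TORNTPOWER", 4), ("CEM", 5), ("ULTRACEM", 5), ("SHREECEM", 5), ("ACC", 5), ("AMBUJA", 5), ("PAINT", 6), ("ASIAN", 6), ("BERGE", 6), ("KANSAI",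 6), ("STEEL", 7), ("TATASTEEL", 7), ("JSWSTEEL", 7), ("SAIL", 7), ("RELIANCE", 8), ("ONGC", 8), ("IOC", 8), ("BPCL", 8), ("HPCL", 8), ("GAIL", 8), ("FMCG", 9), ("HUL", 9), ("ITC", 9), ("NESTLE", 9), ("BRITANNIA", 9), ("DABUR", 9), ("MARICO", 9), ("TELECOM", 10), ("BHARTI", 10), ("IDEA", 10), ("RCOM", 10), ("DLF", 11), ("GODREJPROP", 11), ("PRESTIGE", 11), ("SOBHA", 11), ("BRIGADE", 11)]

lemma get?_assoc (l : List (String × Int)) (s : String) :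
    (PySem.Dict.mk l).get? s = none ∨ ∃ v, (s, v) ∈ l ∧ (PySem.Dict.mk l).get? s = some v := by
  induction l with
  | nil => exact Or.inl rfl
  | cons p rest ih =>
      obtain ⟨k, v⟩ := p
      rw [PySem.Dict.get?_mk_cons]
      by_cases h : (k == s) = true
      · rw [beq_iff_eq] at h
        subst h
        exact Or.inr ⟨v, List.mem_cons_self, by simp⟩
      · simp only [h]
        rcases ih with hn | ⟨w, hw, hg⟩
        · exact Or.inl hn
        · exact Or.inr ⟨w, List.mem_cons_of_mem _ hw, hg⟩

lemma pairs_ok : ∀ pr ∈ rankPairs, 0 ≤ pr.2 ∧ pr.2 < 12 ∧ pr.1 ∈ groupsA[pr.2.toNat]! := by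
  set_option maxRecDepth 10000 in decide

-- a dict hit on an infix of u means the corresponding branch of A fires
set_option maxHeartbeats 2000000 in
lemma rank_sound (s u : String) (hinf : s.toList <:+: u.toList) :
    rankDict.getD s 12 = 12 ∨
    ∃ k : Nat, k < 12 ∧ rankDict.getD s 12 = (k : Int) ∧ matchA k u = true := by
  have hin : PySem.Str.isIn s u = true := (PySem.Str.isIn_iff_infix s u).mpr hinf
  have hd : rankDict = PySem.Dict.mk rankPairs := by
    set_option maxRecDepth 10000 in rfl
  rw [hd, PySem.Dict.getD_eq_get?_getD]
  rcases get?_assoc rankPairs s with hnone | ⟨v, hmem, hget⟩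
  · rw [hnone]; exact Or.inl rfl
  · obtain ⟨h0, h12, hmemg⟩ := pairs_ok _ hmem
    refine Or.inr ⟨v.toNat, by omega, ?_, ?_⟩
    · rw [hget]; simp; omega
    · exact List.any_eq_true.mpr ⟨s, hmemg, hin⟩

-- the lower/upper bound glue and the 13-way case analysis over A's branches
lemma hle_gen (u : String) (k : Nat) (hk : k < 12) (hm : matchA k u = true) :
    (allRanks u).foldl min 12 ≤ (k : Int) := by
  obtain ⟨p, hp, hpin⟩ := List.any_eq_true.mp hm
  obtain ⟨hrk, h1, h10⟩ := rank_complete k hk p hp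
  have hinf := (PySem.Str.isIn_iff_infix p u).mp hpin
  have hb := foldl_min_le_mem _ 12 _ (mem_allRanks_of_infix u p hinf h1 h10)
  rw [hrk] at hb
  exact hb

lemma best_cases (u : String) :
    (allRanks u).foldl min 12 = 12 ∨
    ∃ k : Nat, k < 12 ∧ (k : Int) = (allRanks u).foldl min 12 ∧ matchA k u = true := by
  rcases foldl_min_cases (allRanks u) 12 with h | h
  · exact Or.inl h
  · obtain ⟨s, hinf, hrk⟩ := mem_allRanks_infix u _ h
    rcases rank_sound s u hinf with h12 | ⟨k, hk, hkeq, hkm⟩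
    · exact Or.inl (by rw [← hrk, h12])
    · exact Or.inr ⟨k, hk, by rw [← hkeq, hrk], hkm⟩

lemma best_eq_g (u : String) (g : Nat) (hg : g < 12) (hm : matchA g u = true)
    (hnone : ∀ j, j < g → matchA j u = false) :
    (allRanks u).foldl min 12 = (g : Int) := by
  have hub := hle_gen u g hg hm
  have hlb : ((g : Nat) : Int) ≤ (allRanks u).foldl min 12 := by
    rcases best_cases u with h12 | ⟨k, hk, hkeq, hkm⟩
    · omega
    · by_cases hkg : k < g
      · rw [hnone k hkg] at hkm; cases hkm
      · omega
  omega

lemma best_eq_12 (u : String) (hnone : ∀ j, j < 12 → matchA j u = false) :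
    (allRanks u).foldl min 12 = (12 : Int) := by
  rcases best_cases u with h12 | ⟨k, hk, hkeq, hkm⟩
  · exact h12
  · rw [hnone k hk] at hkm; cases hkm

set_option maxHeartbeats 4000000 in
lemma main_aux (u : String) :
    (if matchA 0 u = true then "Banking"
      else if matchA 1 u = true then "IT"
      else if matchA 2 u = true then "Pharma"
      else if matchA 3 u = true then "Auto"
      else if matchA 4 u = true then "Energy"
      else if matchA 5 u = true then "Manufacturing"
      else if matchA 6 u = true then "Manufacturing"
      else if matchA 7 u = true then "Manufacturing"
      else if matchA 8 u = true then "Energy"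
      else if matchA 9 u = true then "FMCG"
      else if matchA 10 u = true then "Telecom"
      else if matchA 11 u = true then "Real Estate"
      else "Others")
    = (if (allRanks u).foldl min 12 < 12 then
        match PySem.List.pyGet? sectorsB ((allRanks u).foldl min 12) with
        | some s => s
        | none => "Others"
      else "Others") := by
  by_cases h0 : matchA 0 u = true
  · rw [if_pos h0, best_eq_g u 0 (by norm_num) h0 (fun j hj => absurd hj (by omega))]
    norm_num [sectorsB, PySem.List.pyGet?, PySem.List.pyIdx?, Int.toNat]
  · have h0f : matchA 0 u = false := by simpa using h0
    by_cases h1 : matchA 1 u = true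
    · rw [if_neg h0, if_pos h1, best_eq_g u 1 (by norm_num) h1 (fun j hj => by interval_cases j; exact h0f)]
      norm_num [sectorsB, PySem.List.pyGet?, PySem.List.pyIdx?, Int.toNat]
    · have h1f : matchA 1 u = false := by simpa using h1
      by_cases h2 : matchA 2 u = true
      · rw [if_neg h0, if_neg h1, if_pos h2, best_eq_g u 2 (by norm_num) h2 (fun j hj => by interval_cases j <;> first | exact h0f | exact h1f)]
        norm_num [sectorsB, PySem.List.pyGet?, PySem.List.pyIdx?, Int.toNat]
      · have h2f : matchA 2 u = false := by simpa using h2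
        by_cases h3 : matchA 3 u = true
        · rw [if_neg h0, if_neg h1, if_neg h2, if_pos h3, best_eq_g u 3 (by norm_num) h3 (fun j hj => by interval_cases j <;> first | exact h0f | exact h1f | exact h2f)]
          norm_num [sectorsB, PySem.List.pyGet?, PySem.List.pyIdx?, Int.toNat]
        · have h3f : matchA 3 u = false := by simpa using h3
          by_cases h4 : matchA 4 u = true
          · rw [if_neg h0, if_neg h1, if_neg h2, if_neg h3, if_pos h4, best_eq_g u 4 (by norm_num) h4 (fun j hj => by interval_cases j <;> first | exact h0f | exact h1f | exact h2f | exact h3f)]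
            norm_num [sectorsB, PySem.List.pyGet?, PySem.List.pyIdx?, Int.toNat]
          · have h4f : matchA 4 u = false := by simpa using h4
            by_cases h5 : matchA 5 u = true
            · rw [if_neg h0, if_neg h1, if_neg h2, if_neg h3, if_neg h4, if_pos h5, best_eq_g u 5 (by norm_num) h5 (fun j hj => by interval_cases j <;> first | exact h0f | exact h1f | exact h2f | exact h3f | exact h4f)]
              norm_num [sectorsB, PySem.List.pyGet?, PySem.List.pyIdx?, Int.toNat]
            · have h5f : matchA 5 u = false := by simpa using h5
              by_cases h6 : matchA 6 u = true
              · rw [if_neg h0, if_neg h1, if_neg h2, if_neg h3, if_neg h4, if_neg h5, if_pos h6, best_eq_g u 6 (by norm_num) h6 (fun j hj => by interval_cases j <;> first | exact h0f | exact h1f | exact h2f | exact h3f | exact h4f | exact h5f)]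
                norm_num [sectorsB, PySem.List.pyGet?, PySem.List.pyIdx?, Int.toNat]
              · have h6f : matchA 6 u = false := by simpa using h6
                by_cases h7 : matchA 7 u = true
                · rw [if_neg h0, if_neg h1, if_neg h2, if_neg h3, if_neg h4, if_neg h5, if_neg h6, if_pos h7, best_eq_g u 7 (by norm_num) h7 (fun j hj => by interval_cases j <;> first | exact h0f | exact h1f | exact h2f | exact h3f | exact h4f | exact h5f | exact h6f)]
                  norm_num [sectorsB, PySem.List.pyGet?, PySem.List.pyIdx?, Int.toNat]
                · have h7f : matchA 7 u = false := by simpa using h7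
                  by_cases h8 : matchA 8 u = true
                  · rw [if_neg h0, if_neg h1, if_neg h2, if_neg h3, if_neg h4, if_neg h5, if_neg h6, if_neg h7, if_pos h8, best_eq_g u 8 (by norm_num) h8 (fun j hj => by interval_cases j <;> first | exact h0f | exact h1f | exact h2f | exact h3f | exact h4f | exact h5f | exact h6f | exact h7f)]
                    norm_num [sectorsB, PySem.List.pyGet?, PySem.List.pyIdx?, Int.toNat]
                  · have h8f : matchA 8 u = false := by simpa using h8
                    by_cases h9 : matchA 9 u = true
                    · rw [if_neg h0, if_neg h1, if_neg h2, if_neg h3, if_neg h4, if_neg h5, if_neg h6, if_neg h7, if_neg h8, if_pos h9, best_eq_g u 9 (by norm_num) h9 (fun j hj => by interval_cases j <;> first | exact h0f | exact h1f | exact h2f | exact h3f | exact h4f | exact h5f | exact h6f | exact h7f | exact h8f)]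
                      norm_num [sectorsB, PySem.List.pyGet?, PySem.List.pyIdx?, Int.toNat]
                    · have h9f : matchA 9 u = false := by simpa using h9
                      by_cases h10 : matchA 10 u = true
                      · rw [if_neg h0, if_neg h1, if_neg h2, if_neg h3, if_neg h4, if_neg h5, if_neg h6, if_neg h7, if_neg h8, if_neg h9, if_pos h10, best_eq_g u 10 (by norm_num) h10 (fun j hj => by interval_cases j <;> first | exact h0f | exact h1f | exact h2f | exact h3f | exact h4f | exact h5f | exact h6f | exact h7f | exact h8f | exact h9f)]
                        norm_num [sectorsB, PySem.List.pyGet?, PySem.List.pyIdx?, Int.toNat]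
                      · have h10f : matchA 10 u = false := by simpa using h10
                        by_cases h11 : matchA 11 u = true
                        · rw [if_neg h0, if_neg h1, if_neg h2, if_neg h3, if_neg h4, if_neg h5, if_neg h6, if_neg h7, if_neg h8, if_neg h9, if_neg h10, if_pos h11, best_eq_g u 11 (by norm_num) h11 (fun j hj => by interval_cases j <;> first | exact h0f | exact h1f | exact h2f | exact h3f | exact h4f | exact h5f | exact h6f | exact h7f | exact h8f | exact h9f | exact h10f)]
                          norm_num [sectorsB, PySem.List.pyGet?, PySem.List.pyIdx?, Int.toNat]
                        · have h11f : matchA 11 u = false := by simpa using h11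
                          rw [if_neg h0, if_neg h1, if_neg h2, if_neg h3, if_neg h4, if_neg h5, if_neg h6, if_neg h7, if_neg h8, if_neg h9, if_neg h10, if_neg h11, best_eq_12 u (fun j hj => by interval_cases j <;> first | exact h0f | exact h1f | exact h2f | exact h3f | exact h4f | exact h5f | exact h6f | exact h7f | exact h8f | exact h9f | exact h10f | exact h11f)]
                          norm_num

-- ===== VERDICT (by name: the statement is the Claim_ definition above) =====
set_option maxHeartbeats 2000000 in
theorem get_sector_from_symbol_spec : Claim_equal_get_sector_from_symbol := by
  intro symbol _
  unfold Spec_get_sector_from_symbol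
  show get_sector_from_symbol symbol = get_sector_from_symbol_alt symbol
  simp only [get_sector_from_symbol, get_sector_from_symbol_alt]
  rw [best_eq (PySem.Str.upper symbol)]
  have h := main_aux (PySem.Str.upper symbol)
  simp only [matchA, groupsA, List.getElem!_cons_zero, List.getElem!_cons_succ] at h
  exact h
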